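-- pv_equiv track=rewrite | github.com/LazyAGI/LazyLLM | lazyllm/tools/git/review/poster.py | _build_commentable_lines
-- ===== SOURCE A (Python) =====
-- from typing import Any, Dict, List, Optional, Set, Tuple
--
-- def _build_commentable_lines(hunks: List[Tuple[str, int, int, str]]) -> Dict[str, Set[int]]:
--     # Build a mapping of path -> set of new-file line numbers that GitHub will accept
--     # for RIGHT-side review comments.  Only lines that actually appear in the new file
--     # (i.e. context lines ' ' and added lines '+') are valid; deleted lines '-' are NOT
--     # present in the new file and GitHub rejects them with 422.
--     # When content is available, parse it precisely; otherwise fall back to new_count range.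
--     commentable: Dict[str, Set[int]] = {}
--     for path, new_start, new_count, content in hunks:
--         s = commentable.setdefault(path, set())
--         lines = content.splitlines() if content else []
--         if lines:
--             new_no = new_start
--             for raw_line in lines:
--                 if raw_line.startswith('-'):
--                     continue
--                 s.add(new_no)
--                 new_no += 1
--         else:
--             s.update(range(new_start, new_start + new_count))
--     return commentable
-- ===== SOURCE B (Python) =====
-- def _hunk_line_numbers(new_start, new_count, content):
--     # Line numbers one hunk contributes: enumerate the kept (non-deleted) diff
--     # lines starting at new_start when content is present, else the declared range.
--     lines = content.splitlines() if content else []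
--     if lines:
--         return [no for no, _ in enumerate([l for l in lines if not l.startswith('-')], new_start)]
--     return range(new_start, new_start + new_count)
--
--
-- def _build_commentable_lines(hunks):
--     # Purely functional group-by: one nested comprehension builds, for each path,
--     # the union of the line numbers of every hunk with that path; no mutated dict,
--     # no setdefault, no running line counter.
--     return {
--         path: {no for h in hunks if h[0] == path for no in _hunk_line_numbers(h[1], h[2], h[3])}
--         for path, _, _, _ in hunks
--     }
-- ===== Notes on version B (the rewrite author's own statement) =====
-- stated objective: alternative
-- what changed: Replaces A's single mutating pass (setdefault into a dict of sets, per-line running counter adding numbers one by one) with a purely functional nested comprehension: for each path, collect in one per-path scan the union of line numbers of every hunk with that path, computed by enumerate(kept_lines, new_start) instead of a counter.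
import Mathlib
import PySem

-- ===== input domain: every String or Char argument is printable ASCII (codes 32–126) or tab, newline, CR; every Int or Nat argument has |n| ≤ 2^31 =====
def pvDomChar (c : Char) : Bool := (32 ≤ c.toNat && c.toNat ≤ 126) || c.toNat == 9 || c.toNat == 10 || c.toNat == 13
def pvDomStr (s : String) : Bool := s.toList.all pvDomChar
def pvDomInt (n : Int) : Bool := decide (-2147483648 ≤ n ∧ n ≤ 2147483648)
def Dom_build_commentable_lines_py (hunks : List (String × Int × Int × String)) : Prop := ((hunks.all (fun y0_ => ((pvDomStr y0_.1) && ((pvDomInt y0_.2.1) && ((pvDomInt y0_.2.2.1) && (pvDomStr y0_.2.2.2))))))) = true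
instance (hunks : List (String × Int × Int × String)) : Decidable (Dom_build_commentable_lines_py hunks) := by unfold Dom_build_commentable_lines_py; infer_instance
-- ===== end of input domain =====

-- B replaces A's single mutating pass (setdefault into a dict of sets, per-line running
-- counter) by a purely functional nested comprehension: for each path, one per-path scan
-- over all hunks collects the union of its line numbers, computed with
-- enumerate(kept_lines, new_start); objective: alternative (no mutation, no counter).

-- ===== PORT A =====
-- one iteration of A's `for path, new_start, new_count, content in hunks` body
def pvAStep (d : PySem.Dict String (PySem.Set Int)) (h : String × Int × Int × String) :
    PySem.Dict String (PySem.Set Int) :=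
  match h with
  | (path, new_start, new_count, content) =>
    let d := d.setdefault path PySem.Set.empty        -- s = commentable.setdefault(path, set())
    let s := d.getD path PySem.Set.empty
    let lines := if content ≠ "" then PySem.Str.splitlines content else []
    if lines ≠ [] then
      -- new_no = new_start; for raw_line in lines: skip '-' lines, else s.add(new_no); new_no += 1
      let p := lines.foldl (fun (st : PySem.Set Int × Int) raw_line =>
        if PySem.Str.startswith raw_line "-" then st
        else (PySem.Set.add st.1 st.2, st.2 + 1)) (s, new_start)
      d.insert path p.1
    else
      -- s.update(range(new_start, new_start + new_count))
      d.insert path (PySem.Set.update s (PySem.List.pyRange new_start (new_start + new_count) 1))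

def build_commentable_lines_py (hunks : List (String × Int × Int × String)) : List (String × List Int) :=
  (hunks.foldl pvAStep PySem.Dict.empty).items

-- ===== PORT B =====
-- _hunk_line_numbers(new_start, new_count, content)
def pvHunkNums (new_start new_count : Int) (content : String) : List Int :=
  let lines := if content ≠ "" then PySem.Str.splitlines content else []
  if lines ≠ [] then
    -- [no for no, _ in enumerate([l for l in lines if not l.startswith('-')], new_start)]
    (PySem.List.enumerate (lines.filter (fun l => !(PySem.Str.startswith l "-"))) new_start).map
      (fun p => p.1)
  else
    -- range(new_start, new_start + new_count)
    PySem.List.pyRange new_start (new_start + new_count) 1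

-- the inner set comprehension {no for h in hunks if h[0] == path for no in _hunk_line_numbers(...)}
def pvLinesFor (hunks : List (String × Int × Int × String)) (path : String) : PySem.Set Int :=
  PySem.Set.ofList (hunks.flatMap
    (fun h => if h.1 == path then pvHunkNums h.2.1 h.2.2.1 h.2.2.2 else []))

-- the outer dict comprehension {path: {...} for path, _, _, _ in hunks}
def build_commentable_lines_py_alt (hunks : List (String × Int × Int × String)) : List (String × List Int) :=
  (hunks.foldl (fun d h => d.insert h.1 (pvLinesFor hunks h.1)) PySem.Dict.empty).items

-- ===== PRECONDITION & SPEC =====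
def Spec_build_commentable_lines_py (hunks : List (String × Int × Int × String)) (out : List (String × List Int)) : Prop := out = build_commentable_lines_py_alt hunks
instance (hunks : List (String × Int × Int × String)) (out : List (String × List Int)) : Decidable (Spec_build_commentable_lines_py hunks out) := by unfold Spec_build_commentable_lines_py; infer_instance

-- ===== CLAIM (what is proved, stated in full; the proofs are below) =====
def Claim_equal_build_commentable_lines_py : Prop := ∀ (hunks : List (String × Int × Int × String)), Dom_build_commentable_lines_py hunks → Spec_build_commentable_lines_py hunks (build_commentable_lines_py hunks)

-- ===== LEMMAS AND PROOFS =====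

-- A's inner loop over the hunk's lines adds exactly the contiguous range starting at n
-- whose length is the number of lines not starting with '-'.
theorem pvLoop_eq_update_range (lines : List String) (s : PySem.Set Int) (n : Int) :
    (lines.foldl (fun (st : PySem.Set Int × Int) raw_line =>
        if PySem.Str.startswith raw_line "-" then st
        else (PySem.Set.add st.1 st.2, st.2 + 1)) (s, n)).1
    = PySem.Set.update s (PySem.List.pyRange n
        (n + ((lines.countP (fun line => !(PySem.Str.startswith line "-"))) : Int)) 1) := by
  induction lines generalizing s n with
  | nil =>
    simp only [List.foldl_nil, List.countP_nil, Nat.cast_zero, add_zero]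
    rw [show PySem.List.pyRange n n 1 = [] from by simp [PySem.List.pyRange]]
    rfl
  | cons l ls ih =>
    by_cases hl : PySem.Str.startswith l "-" = true
    · have hc0 : (l :: ls).countP (fun line => !(PySem.Str.startswith line "-"))
          = ls.countP (fun line => !(PySem.Str.startswith line "-")) := by
        rw [List.countP_cons, hl]; simp
      rw [List.foldl_cons, if_pos hl, hc0, ih]
    · have hc : (l :: ls).countP (fun line => !(PySem.Str.startswith line "-"))
          = ls.countP (fun line => !(PySem.Str.startswith line "-")) + 1 := by
        rw [List.countP_cons, Bool.eq_false_iff.mpr hl]; simp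
      rw [hc]
      have hcons : PySem.List.pyRange n
          (n + ((ls.countP (fun line => !(PySem.Str.startswith line "-")) + 1 : Nat) : Int)) 1
          = n :: PySem.List.pyRange (n + 1)
              (n + ((ls.countP (fun line => !(PySem.Str.startswith line "-")) + 1 : Nat) : Int)) 1 :=
        PySem.List.pyRange_one_cons (by push_cast; omega)
      rw [hcons, PySem.Set.update_cons, List.foldl_cons, if_neg hl, ih]
      congr 2
      push_cast
      ring

-- B's enumerate-based number list is that same contiguous range.
theorem pvHunkNums_content (new_start new_count : Int) (content : String)
    (hne : (if content ≠ "" then PySem.Str.splitlines content else []) ≠ []) :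
    pvHunkNums new_start new_count content
    = PySem.List.pyRange new_start
        (new_start + (((if content ≠ "" then PySem.Str.splitlines content else []).countP
          (fun line => !(PySem.Str.startswith line "-"))) : Int)) 1 := by
  unfold pvHunkNums
  rw [if_pos hne]
  rw [show ((fun (p : Int × String) => p.1) = (fun (p : Int × String) => p.1)) from rfl]
  rw [PySem.List.map_fst_enumerate]
  rw [List.countP_eq_length_filter]

-- per-hunk effect of A's loop body on the value stored at any path p
theorem pvAStep_getD (d : PySem.Dict String (PySem.Set Int)) (h : String × Int × Int × String)
    (p : String) :
    (pvAStep d h).getD p PySem.Set.empty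
    = if h.1 == p then
        PySem.Set.update (d.getD p PySem.Set.empty) (pvHunkNums h.2.1 h.2.2.1 h.2.2.2)
      else d.getD p PySem.Set.empty := by
  obtain ⟨path, ns, nc, c⟩ := h
  unfold pvAStep
  dsimp only
  by_cases hp : path = p
  · subst hp
    simp only [beq_self_eq_true, if_true]
    by_cases hl : (if c ≠ "" then PySem.Str.splitlines c else []) ≠ []
    · rw [if_pos hl, PySem.Dict.getD_insert_self, pvLoop_eq_update_range,
        PySem.Dict.getD_setdefault_self, pvHunkNums_content _ _ _ hl]
    · rw [if_neg hl, PySem.Dict.getD_insert_self, PySem.Dict.getD_setdefault_self]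
      unfold pvHunkNums
      rw [if_neg hl]
  · have hbe : (path == p) = false := by simp [hp]
    rw [hbe]
    simp only [if_false, Bool.false_eq_true]
    have hne : p ≠ path := fun hh => hp hh.symm
    by_cases hl : (if c ≠ "" then PySem.Str.splitlines c else []) ≠ []
    · rw [if_pos hl, PySem.Dict.getD_insert_of_ne _ _ _ hne,
        PySem.Dict.getD_eq_get?_getD, PySem.Dict.get?_setdefault_of_ne _ _ hne,
        ← PySem.Dict.getD_eq_get?_getD]
    · rw [if_neg hl, PySem.Dict.getD_insert_of_ne _ _ _ hne,
        PySem.Dict.getD_eq_get?_getD, PySem.Dict.get?_setdefault_of_ne _ _ hne,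
        ← PySem.Dict.getD_eq_get?_getD]

-- A's whole fold: at each path, the accumulated set is the concatenation of the
-- number lists of the hunks naming that path.
theorem pvA_getD (hunks : List (String × Int × Int × String))
    (d : PySem.Dict String (PySem.Set Int)) (p : String) :
    ((hunks.foldl pvAStep d).getD p PySem.Set.empty)
    = PySem.Set.update (d.getD p PySem.Set.empty)
        (hunks.flatMap (fun h => if h.1 == p then pvHunkNums h.2.1 h.2.2.1 h.2.2.2 else [])) := by
  induction hunks generalizing d with
  | nil => rfl
  | cons h hs ih =>
    rw [List.foldl_cons, List.flatMap_cons, PySem.Set.update_append, ih, pvAStep_getD]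
    by_cases hb : h.1 == p
    · rw [if_pos hb, if_pos hb]
    · rw [if_neg hb, if_neg hb]; rfl

-- per-hunk effect of A's loop body on the key list
theorem pvAStep_keys (d : PySem.Dict String (PySem.Set Int)) (h : String × Int × Int × String) :
    (pvAStep d h).keys = PySem.Set.add d.keys h.1 := by
  obtain ⟨path, ns, nc, c⟩ := h
  unfold pvAStep
  dsimp only
  have hcont : (d.setdefault path PySem.Set.empty).contains path = true := by
    rw [PySem.Dict.contains_setdefault]; simp
  have hkeys : (d.setdefault path PySem.Set.empty).keys
      = PySem.Set.add d.keys path := by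
    rw [PySem.Dict.keys_setdefault]
    by_cases hc : d.contains path = true
    · rw [if_pos hc]
      have hmem : path ∈ d.keys := (PySem.Dict.contains_iff_mem_keys d path).mp hc
      simp [PySem.Set.add, PySem.Set.contains, hmem]
    · rw [if_neg hc]
      have hmem : path ∉ d.keys := fun hm => hc ((PySem.Dict.contains_iff_mem_keys d path).mpr hm)
      simp [PySem.Set.add, PySem.Set.contains, hmem]
  by_cases hl : (if c ≠ "" then PySem.Str.splitlines c else []) ≠ []
  · rw [if_pos hl, PySem.Dict.keys_insert_of_contains _ _ hcont, hkeys]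
  · rw [if_neg hl, PySem.Dict.keys_insert_of_contains _ _ hcont, hkeys]

theorem pvA_keys (hunks : List (String × Int × Int × String))
    (d : PySem.Dict String (PySem.Set Int)) :
    (hunks.foldl pvAStep d).keys = PySem.Set.update d.keys (hunks.map (·.1)) := by
  induction hunks generalizing d with
  | nil => rfl
  | cons h hs ih =>
    rw [List.foldl_cons, List.map_cons, PySem.Set.update_cons, ih, pvAStep_keys]

-- B's fold: the value at any path appearing among the hunks is pvLinesFor
theorem pvB_getD (hunks0 : List (String × Int × Int × String))
    (hunks : List (String × Int × Int × String))
    (d : PySem.Dict String (PySem.Set Int)) (p : String) :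
    ((hunks.foldl (fun d h => d.insert h.1 (pvLinesFor hunks0 h.1)) d).getD p PySem.Set.empty)
    = if p ∈ hunks.map (·.1) then pvLinesFor hunks0 p else d.getD p PySem.Set.empty := by
  induction hunks generalizing d with
  | nil => simp
  | cons h hs ih =>
    rw [List.foldl_cons, ih]
    by_cases hin : p ∈ hs.map (·.1)
    · rw [if_pos hin, if_pos (by simp [hin])]
    · rw [if_neg hin]
      by_cases hp : p = h.1
      · subst hp
        rw [PySem.Dict.getD_insert_self, if_pos (by simp)]
      · rw [PySem.Dict.getD_insert_of_ne _ _ _ hp,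
          if_neg (by simp [hp, hin])]

-- ===== VERDICT (by name: the statement is the Claim_ definition above) =====
theorem build_commentable_lines_py_spec : Claim_equal_build_commentable_lines_py := by
  intro hunks _
  unfold Spec_build_commentable_lines_py build_commentable_lines_py build_commentable_lines_py_alt
  have hkA : (hunks.foldl pvAStep PySem.Dict.empty).keys
      = PySem.Set.ofList (hunks.map (·.1)) := by
    rw [pvA_keys, PySem.Dict.keys_empty, PySem.Set.update_nil_left]
  have hkB : ((hunks.foldl (fun d h => d.insert h.1 (pvLinesFor hunks h.1))
      PySem.Dict.empty) : PySem.Dict String (PySem.Set Int)).keys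
      = PySem.Set.ofList (hunks.map (·.1)) := by
    rw [PySem.Dict.keys_foldl_insert_key hunks (·.1) (fun _ h => pvLinesFor hunks h.1),
      PySem.Dict.keys_empty, PySem.Set.update_nil_left]
  rw [PySem.Dict.items_eq_map_keys _ (by rw [hkA]; exact PySem.Set.nodup_ofList _) PySem.Set.empty,
    PySem.Dict.items_eq_map_keys _ (by rw [hkB]; exact PySem.Set.nodup_ofList _) PySem.Set.empty,
    hkA, hkB]
  apply List.map_congr_left
  intro k hk
  have hkmem : k ∈ hunks.map (·.1) := by
    simpa [PySem.Set.mem_ofList] using hk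
  rw [pvA_getD, pvB_getD, if_pos hkmem, PySem.Dict.getD_empty, pvLinesFor]
  rw [show (PySem.Set.empty : PySem.Set Int) = [] from rfl, PySem.Set.update_nil_left]
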